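-- pv_equiv track=rewrite | github.com/keiti93/Programming0 | week3/4-Problems-Construction/fib_number2.py | fib_number
-- ===== SOURCE A (Python) =====
-- def fib_number(numbers):
--     number = 0
--
--     for num in numbers:
--
--         if num>9:
--             numbers_new = []
--             y = 0
--             original = num
--
--             while num != 0:
--                 numbers_new = numbers_new + [num%10]
--                 num = num//10
--             new_list = numbers_new[::-1]
--
--             new_number = 0
--
--             for num1 in new_list:
--                 new_number = new_number*10 + num1
--
--             number = number* (10**len(numbers_new)) + new_number
--             num = original
--         else:
--             number = number*10 + num
--
--     return number
-- ===== SOURCE B (Python) =====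
-- def fib_number(numbers):
--     number = 0
--     for num in numbers:
--         p = 10
--         while p <= num:
--             p *= 10
--         number = number * p + num
--     return number
-- ===== Notes on version B (the rewrite author's own statement) =====
-- stated objective: simpler
-- what changed: B drops A's digit-splitting machinery (build digit list with a while loop, reverse it, re-fold it back into the number, then shift by 10**len) and instead computes the smallest power of ten exceeding each element directly with one multiplicative while loop and accumulates number*p+num, with no lists and no per-digit reconstruction.
import Mathlib
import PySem

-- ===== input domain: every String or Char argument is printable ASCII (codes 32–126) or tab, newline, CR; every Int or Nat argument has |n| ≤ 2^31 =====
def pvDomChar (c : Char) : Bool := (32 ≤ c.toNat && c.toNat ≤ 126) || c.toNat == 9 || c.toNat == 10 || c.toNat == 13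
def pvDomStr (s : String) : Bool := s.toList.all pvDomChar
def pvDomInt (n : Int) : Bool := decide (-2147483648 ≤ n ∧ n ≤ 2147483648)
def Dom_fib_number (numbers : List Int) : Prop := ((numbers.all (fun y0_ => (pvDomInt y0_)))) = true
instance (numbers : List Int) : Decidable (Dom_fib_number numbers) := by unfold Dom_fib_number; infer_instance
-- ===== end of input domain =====

-- B replaces A's digit-split/reverse/refold machinery by directly computing the smallest
-- power of ten exceeding each element with one multiplicative loop (objective: simpler).


-- ===== PORT A =====
-- A's inner `while num != 0: numbers_new = numbers_new + [num%10]; num = num//10`.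
-- The loop is only entered with num > 9, along which num stays positive, so the
-- Python condition `num != 0` coincides with `0 < num`; the `0 < num` form is a
-- totality guard only (Lean needs termination for every Int argument).
def aDigits (num : Int) (numbers_new : List Int) : List Int :=
  if 0 < num then
    aDigits (PySem.Int.floordiv num 10) (numbers_new ++ [PySem.Int.mod num 10])
  else numbers_new
termination_by num.toNat
decreasing_by
  rename_i h
  rw [PySem.Int.floordiv_eq_ediv_of_pos (by norm_num : (0:Int) < 10)]
  omega

-- literal port of A's fold; Python's unused `y` and the `original`/`num = original`
-- restore do not affect the result and have no Lean counterpart (the loop variable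
-- is immutable here).
def fib_number (numbers : List Int) : Int :=
  numbers.foldl (fun number num =>
    if num > 9 then
      let numbers_new := aDigits num []
      let new_list := (PySem.List.slice? numbers_new none none (-1)).getD []  -- xs[::-1]; step -1 ≠ 0, never none
      let new_number := new_list.foldl (fun new_number num1 => new_number * 10 + num1) 0
      number * 10 ^ numbers_new.length + new_number
    else
      number * 10 + num) 0

-- ===== PORT B =====
-- B's inner `p = 10; while p <= num: p *= 10`.  In Python p is always a positive
-- power of ten; the `0 < p` conjunct is a totality guard only.
def bPow (num p : Int) : Int :=
  if 0 < p ∧ p ≤ num then bPow num (p * 10) else p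
termination_by (num + 1 - p).toNat
decreasing_by
  rename_i h
  omega

def fib_number_alt (numbers : List Int) : Int :=
  numbers.foldl (fun number num => number * bPow num 10 + num) 0

-- ===== PRECONDITION & SPEC =====
def Spec_fib_number (numbers : List Int) (out : Int) : Prop := out = fib_number_alt numbers
instance (numbers : List Int) (out : Int) : Decidable (Spec_fib_number numbers out) := by unfold Spec_fib_number; infer_instance

-- ===== CLAIM (what is proved, stated in full; the proofs are below) =====
def Claim_equal_fib_number : Prop := ∀ (numbers : List Int), Dom_fib_number numbers → Spec_fib_number numbers (fib_number numbers)

-- ===== LEMMAS AND PROOFS =====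

-- the accumulator of A's digit loop is a pure prefix
lemma aDigits_acc : ∀ (m : Nat) (num : Int), num.toNat ≤ m → ∀ acc, aDigits num acc = acc ++ aDigits num [] := by
  intro m
  induction m with
  | zero =>
      intro num hm acc
      have h : ¬ 0 < num := by omega
      conv_lhs => rw [aDigits]
      conv_rhs => rw [aDigits]
      simp [h]
  | succ m ih =>
      intro num hm acc
      by_cases h : 0 < num
      · have hd : PySem.Int.floordiv num 10 = num / 10 :=
          PySem.Int.floordiv_eq_ediv_of_pos (by norm_num)
        have hlt : (num / 10).toNat ≤ m := by omega
        conv_lhs => rw [aDigits]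
        conv_rhs => rw [aDigits]
        simp only [h, if_pos, hd]
        rw [ih _ hlt (acc ++ [PySem.Int.mod num 10]), ih _ hlt ([] ++ [PySem.Int.mod num 10])]
        simp
      · conv_lhs => rw [aDigits]
        conv_rhs => rw [aDigits]
        simp [h]

lemma aDigits_cons (num : Int) (h : 0 < num) :
    aDigits num [] = PySem.Int.mod num 10 :: aDigits (num / 10) [] := by
  conv_lhs => rw [aDigits]
  simp only [h, if_pos, PySem.Int.floordiv_eq_ediv_of_pos (by norm_num : (0:Int) < 10)]
  rw [aDigits_acc (num / 10).toNat _ le_rfl]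
  simp

lemma aDigits_zero : aDigits 0 [] = [] := by rw [aDigits]; simp

-- A's reverse-and-refold reconstructs the number, shifted into any accumulator
lemma aDigits_refold : ∀ (m : Nat) (num : Int), num.toNat ≤ m → 0 < num → ∀ a : Int,
    ((aDigits num []).reverse).foldl (fun x d => x * 10 + d) a
      = a * 10 ^ (aDigits num []).length + num := by
  intro m
  induction m with
  | zero => intro num hm h; omega
  | succ m ih =>
      intro num hm h a
      have hmod : PySem.Int.mod num 10 = num % 10 :=
        PySem.Int.mod_eq_emod_of_pos (by norm_num)
      have hnum : num / 10 * 10 + num % 10 = num := by omega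
      rw [aDigits_cons num h, hmod]
      by_cases h10 : num < 10
      · have hz : num / 10 = 0 := by omega
        rw [hz, aDigits_zero]
        simp
        omega
      · have hpos : 0 < num / 10 := by omega
        have hlt : (num / 10).toNat ≤ m := by omega
        simp only [List.reverse_cons, List.foldl_append, List.foldl_cons, List.foldl_nil,
          List.length_cons]
        rw [ih _ hlt hpos a, pow_succ]
        linear_combination hnum

-- the shift law of B's power loop
lemma bPow_shift : ∀ (m : Nat) (num p : Int), (num + 1 - p * 10).toNat ≤ m → 0 < p →
    bPow num (p * 10) = 10 * bPow (num / 10) p := by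
  intro m
  induction m with
  | zero =>
      intro num p hm hp
      conv_lhs => rw [bPow]
      conv_rhs => rw [bPow]
      rw [if_neg (by omega : ¬ (0 < p * 10 ∧ p * 10 ≤ num)),
          if_neg (by omega : ¬ (0 < p ∧ p ≤ num / 10))]
      ring
  | succ m ih =>
      intro num p hm hp
      by_cases hc : p * 10 ≤ num
      · conv_lhs => rw [bPow]
        conv_rhs => rw [bPow]
        rw [if_pos (by omega : (0 < p * 10 ∧ p * 10 ≤ num)),
            if_pos (by omega : (0 < p ∧ p ≤ num / 10))]
        exact ih num (p * 10) (by omega) (by omega)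
      · conv_lhs => rw [bPow]
        conv_rhs => rw [bPow]
        rw [if_neg (by omega : ¬ (0 < p * 10 ∧ p * 10 ≤ num)),
            if_neg (by omega : ¬ (0 < p ∧ p ≤ num / 10))]
        ring

-- A's 10^len(digits) is exactly B's power
lemma pow_len_eq_bPow : ∀ (m : Nat) (num : Int), num.toNat ≤ m → 0 < num →
    (10 : Int) ^ (aDigits num []).length = bPow num 10 := by
  intro m
  induction m with
  | zero => intro num hm h; omega
  | succ m ih =>
      intro num hm h
      rw [aDigits_cons num h]
      by_cases h10 : num < 10
      · have hz : num / 10 = 0 := by omega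
        rw [hz, aDigits_zero, bPow]
        rw [if_neg (by omega : ¬ ((0:Int) < 10 ∧ (10:Int) ≤ num))]
        simp
      · have hpos : 0 < num / 10 := by omega
        rw [List.length_cons, pow_succ, mul_comm, ih _ (by omega) hpos]
        have h1 : bPow num 10 = bPow num ((10:Int) * 10) := by
          rw [bPow]
          rw [if_pos (by omega : ((0:Int) < 10 ∧ (10:Int) ≤ num))]
        rw [h1, bPow_shift (num + 1 - 10 * 10).toNat num 10 le_rfl (by norm_num)]

lemma step_eq (number num : Int) :
    (if num > 9 then
      number * 10 ^ (aDigits num []).length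
        + (((PySem.List.slice? (aDigits num []) none none (-1)).getD []).foldl
            (fun new_number num1 => new_number * 10 + num1) 0)
     else number * 10 + num)
    = number * bPow num 10 + num := by
  by_cases h : num > 9
  · have hpos : 0 < num := by omega
    rw [if_pos h, PySem.List.slice?_none_none_neg_one, Option.getD_some]
    rw [aDigits_refold num.toNat num le_rfl hpos 0]
    rw [pow_len_eq_bPow num.toNat num le_rfl hpos]
    ring
  · rw [if_neg h, bPow]
    rw [if_neg (by omega : ¬ ((0:Int) < 10 ∧ (10:Int) ≤ num))]

lemma folds_eq (numbers : List Int) : fib_number numbers = fib_number_alt numbers := by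
  unfold fib_number fib_number_alt
  induction numbers using List.reverseRecOn with
  | nil => rfl
  | append_singleton xs x ih =>
      simp only [List.foldl_append, List.foldl_cons, List.foldl_nil]
      rw [ih]
      exact step_eq _ x

-- ===== VERDICT (by name: the statement is the Claim_ definition above) =====
theorem fib_number_spec : Claim_equal_fib_number := by
  intro numbers _
  exact folds_eq numbers
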